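-- pv_equiv track=rewrite | github.com/Hou-Lab-CSHL/cheese3d | packages/cheese3d-annotator/cheese3d_annotator/data_visualizer/rig_view.py | _parse_keypoint_bases
-- ===== SOURCE A (Python) =====
-- from typing import Dict, Tuple, Optional, List
--
-- def _parse_keypoint_bases(columns: List[str]) -> List[str]:
--     cols = set(columns)
--     bases: List[str] = []
--     for c in cols:
--         if c.endswith("_x"):
--             b = c[:-2]
--             if f"{b}_y" in cols and f"{b}_z" in cols:
--                 bases.append(b)
--     bases.sort()
--     return bases
-- ===== SOURCE B (Python) =====
-- from typing import List
--
-- def _parse_keypoint_bases(columns: List[str]) -> List[str]: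
--     # One pass: index base -> set of axis suffixes seen; keep bases with all three.
--     axes = {}
--     for c in columns:
--         suf = c[-2:]
--         if suf in ("_x", "_y", "_z"):
--             axes.setdefault(c[:-2], set()).add(suf)
--     bases = [b for b, s in axes.items() if len(s) == 3]
--     bases.sort()
--     return bases
-- ===== Notes on version B (the rewrite author's own statement) =====
-- stated objective: alternative
-- what changed: B replaces A's anchor-on-_x-and-probe-a-set scan with a single pass that builds a base->axis-suffix index (dict of sets) and then keeps the bases whose accumulated axis set has all three axes, sorted.
import Mathlib
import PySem

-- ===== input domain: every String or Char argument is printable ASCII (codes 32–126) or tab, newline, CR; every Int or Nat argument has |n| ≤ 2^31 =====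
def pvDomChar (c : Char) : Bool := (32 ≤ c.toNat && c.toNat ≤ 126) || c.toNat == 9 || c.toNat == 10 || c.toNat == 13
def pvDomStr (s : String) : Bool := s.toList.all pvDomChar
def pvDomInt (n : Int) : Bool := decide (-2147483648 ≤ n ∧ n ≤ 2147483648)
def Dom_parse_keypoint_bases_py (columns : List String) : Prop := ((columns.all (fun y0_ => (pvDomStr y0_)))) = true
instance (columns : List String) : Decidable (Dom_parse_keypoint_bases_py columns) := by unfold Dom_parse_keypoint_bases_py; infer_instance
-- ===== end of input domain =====

-- B builds a base->axis-suffix index in one pass and keeps bases with all three axes (alternative decomposition, same cost).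


-- ===== PORT A =====
-- A iterates over set(columns); its result is sorted, so the (unmodelled) set iteration order cannot affect it.
-- f"{b}_y" is ported as String.ofList (b.toList ++ ['_','y']) (Lean's own String append is kernel-opaque).
def parse_keypoint_bases_py (columns : List String) : List String :=
  let cols : PySem.Set String := PySem.Set.ofList columns
  let bases : List String := cols.foldl (fun bases c =>
    if PySem.Str.endswith c "_x" then
      let b := String.ofList (PySem.List.slice c.toList none (some (-2)))   -- c[:-2]
      if PySem.Set.contains cols (String.ofList (b.toList ++ ['_', 'y'])) &&
         PySem.Set.contains cols (String.ofList (b.toList ++ ['_', 'z'])) then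
        bases ++ [b]
      else bases
    else bases) []
  PySem.List.sorted bases (fun x => x) false

-- ===== PORT B =====
-- axes.setdefault(c[:-2], set()).add(suf) is Dict.modify with default Set.empty; bases.sort() is PySem.List.sorted.
def parse_keypoint_bases_py_alt (columns : List String) : List String :=
  let axes : PySem.Dict String (PySem.Set String) := columns.foldl (fun d c =>
    let suf := String.ofList (PySem.List.slice c.toList (some (-2)) none)   -- c[-2:]
    if suf == "_x" || suf == "_y" || suf == "_z" then
      PySem.Dict.modify d (String.ofList (PySem.List.slice c.toList none (some (-2)))) PySem.Set.empty
        (fun s => PySem.Set.add s suf)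
    else d) PySem.Dict.empty
  let bases : List String := (axes.items.filter (fun p => p.2.length == 3)).map (fun p => p.1)
  PySem.List.sorted bases (fun x => x) false

-- ===== PRECONDITION & SPEC =====
def Spec_parse_keypoint_bases_py (columns : List String) (out : List String) : Prop := out = parse_keypoint_bases_py_alt columns
instance (columns : List String) (out : List String) : Decidable (Spec_parse_keypoint_bases_py columns out) := by unfold Spec_parse_keypoint_bases_py; infer_instance

-- ===== CLAIM =====
def Claim_equal_parse_keypoint_bases_py : Prop := ∀ (columns : List String), Dom_parse_keypoint_bases_py columns → Spec_parse_keypoint_bases_py columns (parse_keypoint_bases_py columns)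

-- ===== LEMMAS AND PROOFS =====

-- c[:-2] and c[-2:] as helpers for the proofs.
def basS (c : String) : String := String.ofList (PySem.List.slice c.toList none (some (-2)))
def sufC (c : String) : List Char := PySem.List.slice c.toList (some (-2)) none
def sufS (c : String) : String := String.ofList (sufC c)
def qualB (c : String) : Bool := sufC c == ['_','x'] || sufC c == ['_','y'] || sufC c == ['_','z']

lemma ofList_eq_iff (l : List Char) (s : String) : String.ofList l = s ↔ l = s.toList := by
  constructor
  · intro h; simpa using congrArg String.toList h
  · intro h; subst h; simp

lemma toList_eq_iff (s t : String) : s.toList = t.toList ↔ s = t := by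
  constructor
  · intro h; simpa using congrArg String.ofList h
  · intro h; rw [h]

lemma toList_basS (c : String) : (basS c).toList = c.toList.take (c.toList.length - 2) := by
  rw [basS, PySem.List.slice_to_neg_ofNat c.toList 2 (by omega)]; simp

lemma sufC_eq (c : String) : sufC c = c.toList.drop (c.toList.length - 2) := by
  rw [sufC, PySem.List.slice_from_neg_ofNat c.toList 2 (by omega)]

lemma split_c (c : String) : (basS c).toList ++ sufC c = c.toList := by
  rw [toList_basS, sufC_eq]; exact List.take_append_drop _ _

lemma decomp (c : String) (b s : List Char) (hs : s.length = 2) (h : c.toList = b ++ s) :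
    (basS c).toList = b ∧ sufC c = s := by
  constructor
  · rw [toList_basS, h, List.length_append, hs]
    simp
  · rw [sufC_eq, h, List.length_append, hs]
    simp

lemma sufC_eq_iff (c : String) (s : List Char) (hs : s.length = 2) : sufC c = s ↔ s <:+ c.toList := by
  constructor
  · intro h; exact ⟨(basS c).toList, by rw [← h]; exact split_c c⟩
  · rintro ⟨t, ht⟩; exact (decomp c t s hs ht.symm).2

lemma endswith_x (c : String) : PySem.Str.endswith c "_x" = true ↔ sufC c = ['_','x'] := by
  have hx : ("_x" : String).toList = ['_','x'] := by decide
  simp only [PySem.Str.endswith_eq, PySem.Chars.endswith_iff, hx]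
  exact (sufC_eq_iff c _ (by decide)).symm

-- the loop-body condition of port A as a predicate on c
def PA (columns : List String) (c : String) : Bool :=
  PySem.Str.endswith c "_x" &&
    (PySem.Set.contains (PySem.Set.ofList columns) (String.ofList ((basS c).toList ++ ['_', 'y'])) &&
     PySem.Set.contains (PySem.Set.ofList columns) (String.ofList ((basS c).toList ++ ['_', 'z'])))

lemma A_eq (columns : List String) :
    parse_keypoint_bases_py columns =
      PySem.List.sorted (((PySem.Set.ofList columns).filter (PA columns)).map basS) (fun x => x) false := by
  have hbody : (fun (bases : List String) (c : String) =>
      if PySem.Str.endswith c "_x" then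
        if PySem.Set.contains (PySem.Set.ofList columns) (String.ofList ((basS c).toList ++ ['_', 'y'])) &&
           PySem.Set.contains (PySem.Set.ofList columns) (String.ofList ((basS c).toList ++ ['_', 'z'])) then
          bases ++ [basS c]
        else bases
      else bases)
      = (fun bases c => if PA columns c then bases ++ [basS c] else bases) := by
    funext bases c
    show _ = (if PySem.Str.endswith c "_x" &&
        (PySem.Set.contains (PySem.Set.ofList columns) (String.ofList ((basS c).toList ++ ['_', 'y'])) &&
         PySem.Set.contains (PySem.Set.ofList columns) (String.ofList ((basS c).toList ++ ['_', 'z']))) then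
        bases ++ [basS c] else bases)
    cases h1 : PySem.Str.endswith c "_x" <;>
      cases h2 : PySem.Set.contains (PySem.Set.ofList columns) (String.ofList ((basS c).toList ++ ['_', 'y'])) &&
         PySem.Set.contains (PySem.Set.ofList columns) (String.ofList ((basS c).toList ++ ['_', 'z'])) <;>
      simp only [Bool.true_and, Bool.false_and] <;> simp
  show PySem.List.sorted
      (List.foldl (fun (bases : List String) (c : String) =>
        if PySem.Str.endswith c "_x" then
          if PySem.Set.contains (PySem.Set.ofList columns) (String.ofList ((basS c).toList ++ ['_', 'y'])) &&
             PySem.Set.contains (PySem.Set.ofList columns) (String.ofList ((basS c).toList ++ ['_', 'z'])) then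
            bases ++ [basS c]
          else bases
        else bases) [] (PySem.Set.ofList columns)) (fun x => x) false = _
  rw [hbody, PySem.List.foldl_append_if (PA columns) basS]
  simp

lemma mem_LA (columns : List String) (b : String) :
    b ∈ ((PySem.Set.ofList columns).filter (PA columns)).map basS ↔
      (String.ofList (b.toList ++ ['_','x']) ∈ columns ∧
       String.ofList (b.toList ++ ['_','y']) ∈ columns ∧
       String.ofList (b.toList ++ ['_','z']) ∈ columns) := by
  simp only [List.mem_map, List.mem_filter, PySem.Set.mem_ofList]
  constructor
  · rintro ⟨c, ⟨hc, hpa⟩, hb⟩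
    simp only [PA, Bool.and_eq_true] at hpa
    obtain ⟨h1, h2, h3⟩ := hpa
    have hsuf := (endswith_x c).mp h1
    have hct : c.toList = b.toList ++ ['_','x'] := by
      rw [← split_c c, hsuf, hb]
    refine ⟨?_, ?_, ?_⟩
    · rw [(ofList_eq_iff _ c).mpr hct.symm]; exact hc
    · rw [hb] at h2; simpa [PySem.Set.contains] using h2
    · rw [hb] at h3; simpa [PySem.Set.contains] using h3
  · rintro ⟨hx, hy, hz⟩
    have hd := decomp (String.ofList (b.toList ++ ['_','x'])) b.toList ['_','x'] (by decide) (by simp)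
    refine ⟨String.ofList (b.toList ++ ['_','x']), ⟨hx, ?_⟩, ?_⟩
    · simp only [PA, Bool.and_eq_true]
      refine ⟨(endswith_x _).mpr hd.2, ?_, ?_⟩
      · rw [hd.1]; simpa [PySem.Set.contains] using hy
      · rw [hd.1]; simpa [PySem.Set.contains] using hz
    · rw [← toList_eq_iff, hd.1]

lemma nodup_LA (columns : List String) :
    (((PySem.Set.ofList columns).filter (PA columns)).map basS).Nodup := by
  apply List.Nodup.map_on
  · intro x hx y hy hxy
    simp only [List.mem_filter] at hx hy
    have hsx := (endswith_x x).mp (by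
      have := hx.2; simp only [PA, Bool.and_eq_true] at this; exact this.1)
    have hsy := (endswith_x y).mp (by
      have := hy.2; simp only [PA, Bool.and_eq_true] at this; exact this.1)
    rw [← toList_eq_iff, ← split_c x, ← split_c y, hsx, hsy, hxy]
  · exact (PySem.Set.nodup_ofList columns).filter _

-- ===== B side =====

lemma getD_fold (l : List String) (d : PySem.Dict String (PySem.Set String)) (b : String) :
    (l.foldl (fun d c => PySem.Dict.modify d (basS c) PySem.Set.empty (fun s => PySem.Set.add s (sufS c))) d).getD b PySem.Set.empty
      = ((l.filter (fun c => basS c == b)).map sufS).foldl PySem.Set.add (d.getD b PySem.Set.empty) := by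
  induction l generalizing d with
  | nil => rfl
  | cons c t ih =>
    simp only [List.foldl_cons, List.filter_cons]
    by_cases h : basS c = b
    · subst h
      simp only [beq_self_eq_true, if_pos, List.map_cons, List.foldl_cons, ih,
        PySem.Dict.getD_modify_self]
    · have hne : (basS c == b) = false := by simp [h]
      rw [hne]
      simp only [Bool.false_eq_true, if_false, ih]
      rw [PySem.Dict.getD_modify, if_neg (fun hh => h hh.symm)]

-- the qualifying-suffix multiset for a base b
def Mlist (columns : List String) (b : String) : List String :=
  ((columns.filter qualB).filter (fun c => basS c == b)).map sufS

def PB (columns : List String) (b : String) : Bool :=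
  (PySem.Set.ofList (Mlist columns b)).length == 3

lemma B_eq (columns : List String) :
    parse_keypoint_bases_py_alt columns =
      PySem.List.sorted
        ((PySem.Set.ofList ((columns.filter qualB).map basS)).filter (PB columns))
        (fun x => x) false := by
  have hbody : (fun (d : PySem.Dict String (PySem.Set String)) (c : String) =>
      if sufS c == "_x" || sufS c == "_y" || sufS c == "_z" then
        PySem.Dict.modify d (basS c) PySem.Set.empty (fun s => PySem.Set.add s (sufS c))
      else d)
      = (fun d c => if qualB c then PySem.Dict.modify d (basS c) PySem.Set.empty (fun s => PySem.Set.add s (sufS c)) else d) := by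
    funext d c
    have e : ∀ (s : String) (cs : List Char), s.toList = cs →
        (sufS c == s) = (sufC c == cs) := by
      intro s cs hcs
      rw [Bool.eq_iff_iff]
      simp only [beq_iff_eq, sufS, ofList_eq_iff, hcs]
    have hq : (sufS c == "_x" || sufS c == "_y" || sufS c == "_z") = qualB c := by
      rw [qualB, e "_x" ['_','x'] (by decide), e "_y" ['_','y'] (by decide), e "_z" ['_','z'] (by decide)]
    rw [hq]
  show PySem.List.sorted
      (((List.foldl (fun (d : PySem.Dict String (PySem.Set String)) (c : String) =>
          if sufS c == "_x" || sufS c == "_y" || sufS c == "_z" then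
            PySem.Dict.modify d (basS c) PySem.Set.empty (fun s => PySem.Set.add s (sufS c))
          else d) PySem.Dict.empty columns).items.filter (fun p => p.2.length == 3)).map (fun p => p.1))
      (fun x => x) false = _
  rw [hbody, PySem.List.foldl_if_eq_foldl_filter qualB
      (fun d c => PySem.Dict.modify d (basS c) PySem.Set.empty (fun s => PySem.Set.add s (sufS c)))]
  set ax := (columns.filter qualB).foldl
      (fun d c => PySem.Dict.modify d (basS c) PySem.Set.empty (fun s => PySem.Set.add s (sufS c)))
      PySem.Dict.empty with hax
  have hnd : ax.keys.Nodup := by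
    rw [hax]
    exact PySem.Dict.nodup_keys_foldl_modify_key (columns.filter qualB) basS PySem.Set.empty
      (fun d c => fun s => PySem.Set.add s (sufS c)) PySem.Dict.empty PySem.Dict.nodup_keys_empty
  have hkeys : ax.keys = PySem.Set.ofList ((columns.filter qualB).map basS) := by
    rw [hax]
    rw [PySem.Dict.keys_foldl_modify_key (key := basS)
      (f := fun d c => fun s => PySem.Set.add s (sufS c))]
    simp [PySem.Set.update, PySem.Set.ofList_eq_foldl, PySem.Dict.keys_empty]
  have hgetD : ∀ b, ax.getD b PySem.Set.empty = PySem.Set.ofList (Mlist columns b) := by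
    intro b
    rw [hax, getD_fold]
    rfl
  have hitems : ax.items = ax.keys.map (fun k => (k, ax.getD k PySem.Set.empty)) :=
    PySem.Dict.items_eq_map_keys ax hnd PySem.Set.empty
  rw [hitems, List.filter_map, List.map_map]
  have hcomp : ((fun p : String × PySem.Set String => p.1) ∘ fun k => (k, ax.getD k PySem.Set.empty)) = id := rfl
  rw [hcomp, List.map_id]
  rw [hkeys]
  congr 1
  apply List.filter_congr
  intro b _
  simp only [Function.comp_apply, hgetD b, PB]

lemma qualB_iff (c : String) : qualB c = true ↔ (sufC c = ['_','x'] ∨ sufC c = ['_','y'] ∨ sufC c = ['_','z']) := by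
  simp [qualB, or_assoc]

lemma mem_M (columns : List String) (b : String) (cs : List Char) (h2 : cs.length = 2)
    (hax : cs = ['_','x'] ∨ cs = ['_','y'] ∨ cs = ['_','z']) :
    String.ofList cs ∈ Mlist columns b ↔ String.ofList (b.toList ++ cs) ∈ columns := by
  simp only [Mlist, List.mem_map, List.mem_filter, beq_iff_eq]
  constructor
  · rintro ⟨c, ⟨⟨hc, hq⟩, hb⟩, hsuf⟩
    have hsc : sufC c = cs := by
      have := congrArg String.toList hsuf
      simpa [sufS] using this
    have hct : c.toList = b.toList ++ cs := by rw [← split_c c, hsc, hb]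
    rw [(ofList_eq_iff _ c).mpr hct.symm]
    exact hc
  · intro hmem
    have hd := decomp (String.ofList (b.toList ++ cs)) b.toList cs h2 (by simp)
    refine ⟨String.ofList (b.toList ++ cs), ⟨⟨hmem, ?_⟩, ?_⟩, ?_⟩
    · rw [qualB_iff]
      rcases hax with h|h|h <;> rw [hd.2, h] <;> simp
    · rw [← toList_eq_iff, hd.1]
    · rw [sufS, hd.2]

lemma len3_iff (S : List String) (hnd : S.Nodup)
    (hsub : ∀ s ∈ S, s = "_x" ∨ s = "_y" ∨ s = "_z") :
    S.length = 3 ↔ ("_x" ∈ S ∧ "_y" ∈ S ∧ "_z" ∈ S) := by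
  constructor
  · intro hlen
    refine ⟨?_, ?_, ?_⟩ <;> by_contra hx
    · have hss : S ⊆ ["_y","_z"] := by
        intro s hs; rcases hsub s hs with h|h|h <;> subst h <;> simp_all
      have := (List.subperm_of_subset hnd hss).length_le
      simp [hlen] at this
    · have hss : S ⊆ ["_x","_z"] := by
        intro s hs; rcases hsub s hs with h|h|h <;> subst h <;> simp_all
      have := (List.subperm_of_subset hnd hss).length_le
      simp [hlen] at this
    · have hss : S ⊆ ["_x","_y"] := by
        intro s hs; rcases hsub s hs with h|h|h <;> subst h <;> simp_all
      have := (List.subperm_of_subset hnd hss).length_le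
      simp [hlen] at this
  · rintro ⟨h1, h2, h3⟩
    have hsup : (["_x","_y","_z"] : List String) ⊆ S := by
      intro s hs; simp only [List.mem_cons, List.not_mem_nil, or_false] at hs
      rcases hs with h|h|h <;> subst h <;> assumption
    have hge := (List.subperm_of_subset (by decide) hsup).length_le
    have hss : S ⊆ ["_x","_y","_z"] := by
      intro s hs; rcases hsub s hs with h|h|h <;> simp [h]
    have hle := (List.subperm_of_subset hnd hss).length_le
    simp at hge hle
    omega

lemma mem_S_sub (columns : List String) (b : String) :
    ∀ s ∈ PySem.Set.ofList (Mlist columns b), s = "_x" ∨ s = "_y" ∨ s = "_z" := by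
  intro s hs
  rw [PySem.Set.mem_ofList] at hs
  simp only [Mlist, List.mem_map, List.mem_filter] at hs
  obtain ⟨c, ⟨⟨_, hq⟩, _⟩, hsuf⟩ := hs
  rcases (qualB_iff c).mp hq with h|h|h
  · left; rw [← hsuf, sufS, h]
  · right; left; rw [← hsuf, sufS, h]
  · right; right; rw [← hsuf, sufS, h]

lemma mem_LB (columns : List String) (b : String) :
    b ∈ (PySem.Set.ofList ((columns.filter qualB).map basS)).filter (PB columns) ↔
      (String.ofList (b.toList ++ ['_','x']) ∈ columns ∧
       String.ofList (b.toList ++ ['_','y']) ∈ columns ∧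
       String.ofList (b.toList ++ ['_','z']) ∈ columns) := by
  rw [List.mem_filter]
  constructor
  · rintro ⟨hk, hp⟩
    have hlen : (PySem.Set.ofList (Mlist columns b)).length = 3 := by
      simpa [PB] using hp
    have h3 := (len3_iff _ (PySem.Set.nodup_ofList _) (mem_S_sub columns b)).mp hlen
    have hx := (mem_M columns b ['_','x'] (by decide) (by left; rfl)).mp
      (by rw [← PySem.Set.mem_ofList]; rw [show String.ofList ['_','x'] = "_x" from by decide]; exact h3.1)
    have hy := (mem_M columns b ['_','y'] (by decide) (by right; left; rfl)).mp
      (by rw [← PySem.Set.mem_ofList]; rw [show String.ofList ['_','y'] = "_y" from by decide]; exact h3.2.1)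
    have hz := (mem_M columns b ['_','z'] (by decide) (by right; right; rfl)).mp
      (by rw [← PySem.Set.mem_ofList]; rw [show String.ofList ['_','z'] = "_z" from by decide]; exact h3.2.2)
    exact ⟨hx, hy, hz⟩
  · rintro ⟨hx, hy, hz⟩
    have hmx := (mem_M columns b ['_','x'] (by decide) (by left; rfl)).mpr hx
    have hmy := (mem_M columns b ['_','y'] (by decide) (by right; left; rfl)).mpr hy
    have hmz := (mem_M columns b ['_','z'] (by decide) (by right; right; rfl)).mpr hz
    constructor
    · rw [PySem.Set.mem_ofList]
      simp only [Mlist, List.mem_map, List.mem_filter, beq_iff_eq] at hmx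
      obtain ⟨c, ⟨hcf, hb⟩, _⟩ := hmx
      exact List.mem_map.mpr ⟨c, List.mem_filter.mpr hcf, hb⟩
    · rw [PB, beq_iff_eq]
      apply (len3_iff _ (PySem.Set.nodup_ofList _) (mem_S_sub columns b)).mpr
      refine ⟨?_, ?_, ?_⟩
      · rw [show ("_x" : String) = String.ofList ['_','x'] from by decide, PySem.Set.mem_ofList]; exact hmx
      · rw [show ("_y" : String) = String.ofList ['_','y'] from by decide, PySem.Set.mem_ofList]; exact hmy
      · rw [show ("_z" : String) = String.ofList ['_','z'] from by decide, PySem.Set.mem_ofList]; exact hmz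

lemma nodup_LB (columns : List String) :
    ((PySem.Set.ofList ((columns.filter qualB).map basS)).filter (PB columns)).Nodup :=
  (PySem.Set.nodup_ofList _).filter _

-- ===== VERDICT =====
theorem parse_keypoint_bases_py_spec : Claim_equal_parse_keypoint_bases_py := by
  intro columns _
  show parse_keypoint_bases_py columns = parse_keypoint_bases_py_alt columns
  rw [A_eq, B_eq]
  apply PySem.List.sorted_eq_sorted_of_perm _ _ _ (fun a b h => h)
  rw [List.perm_ext_iff_of_nodup (nodup_LA columns) (nodup_LB columns)]
  intro b
  rw [mem_LA, mem_LB]
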